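-- pv_equiv track=rewrite | github.com/ashwinkk23/result_analysis | results_data_analysis_GUI.py | TotRes
-- ===== SOURCE A (Python) =====
-- def TotRes(res):
--     fcd = 0
--     fc = 0
--     sc = 0
--     p = 0
--     f = 0
--     for ele in res:
--         if ele == 'FCD':
--             fcd = fcd + 1
--         elif ele == 'FC':
--             fc = fc + 1
--         elif ele == 'SC':
--             sc = sc + 1
--         elif ele == 'P':
--             p = p + 1
--         elif ele == 'F':
--             f = f + 1
--         else:
--             pass
--     otlst = [('FCD',fcd),
--                 ('FC',fc),
--                 ('SC',sc),
--                 ('P',p),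
--                 ('F',f)]
--     return otlst
-- ===== SOURCE B (Python) =====
-- def TotRes(res):
--     lst = list(res)
--     return [(c, lst.count(c)) for c in ['FCD', 'FC', 'SC', 'P', 'F']]
-- ===== Notes on version B (the rewrite author's own statement) =====
-- stated objective: simpler
-- what changed: Replaces the five-counter if/elif accumulating pass with a comprehension of independent list.count scans over the materialized list, one per category.
import Mathlib
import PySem

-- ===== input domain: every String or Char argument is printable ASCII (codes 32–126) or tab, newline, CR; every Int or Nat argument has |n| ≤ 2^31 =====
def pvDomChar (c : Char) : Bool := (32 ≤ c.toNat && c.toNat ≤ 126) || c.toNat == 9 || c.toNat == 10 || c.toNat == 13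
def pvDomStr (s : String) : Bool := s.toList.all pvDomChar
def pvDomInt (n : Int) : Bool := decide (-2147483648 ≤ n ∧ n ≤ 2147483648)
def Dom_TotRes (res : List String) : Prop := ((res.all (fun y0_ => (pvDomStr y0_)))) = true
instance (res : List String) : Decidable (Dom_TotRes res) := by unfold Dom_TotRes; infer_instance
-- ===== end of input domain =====

-- B replaces A's single five-counter if/elif pass with one independent count per category (objective: simpler).

-- ===== PORT A =====
-- the for-loop over res carrying the five counters (fcd, fc, sc, p, f)
def TotRes (res : List String) : List (String × Int) :=
  let st :=
    res.foldl
      (fun (s : Int × Int × Int × Int × Int) ele =>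
        let (fcd, fc, sc, p, f) := s
        if ele == "FCD" then (fcd + 1, fc, sc, p, f)
        else if ele == "FC" then (fcd, fc + 1, sc, p, f)
        else if ele == "SC" then (fcd, fc, sc + 1, p, f)
        else if ele == "P" then (fcd, fc, sc, p + 1, f)
        else if ele == "F" then (fcd, fc, sc, p, f + 1)
        else (fcd, fc, sc, p, f))
      (0, 0, 0, 0, 0)
  let (fcd, fc, sc, p, f) := st
  [("FCD", fcd), ("FC", fc), ("SC", sc), ("P", p), ("F", f)]

-- ===== PORT B =====
def TotRes_alt (res : List String) : List (String × Int) :=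
  let lst := res
  ["FCD", "FC", "SC", "P", "F"].map (fun c => (c, (PySem.List.count lst c : Int)))

-- ===== PRECONDITION & SPEC =====
def Spec_TotRes (res : List String) (out : List (String × Int)) : Prop := out = TotRes_alt res
instance (res : List String) (out : List (String × Int)) : Decidable (Spec_TotRes res out) := by unfold Spec_TotRes; infer_instance

-- ===== CLAIM (what is proved, stated in full; the proofs are below) =====
def Claim_equal_TotRes : Prop := ∀ (res : List String), Dom_TotRes res → Spec_TotRes res (TotRes res)

-- ===== LEMMAS AND PROOFS =====
set_option maxHeartbeats 1600000 in
theorem TotRes_fold_counts (res : List String) (a b c d e : Int) :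
    res.foldl
      (fun (s : Int × Int × Int × Int × Int) ele =>
        let (fcd, fc, sc, p, f) := s
        if ele == "FCD" then (fcd + 1, fc, sc, p, f)
        else if ele == "FC" then (fcd, fc + 1, sc, p, f)
        else if ele == "SC" then (fcd, fc, sc + 1, p, f)
        else if ele == "P" then (fcd, fc, sc, p + 1, f)
        else if ele == "F" then (fcd, fc, sc, p, f + 1)
        else (fcd, fc, sc, p, f))
      (a, b, c, d, e)
    = (a + res.count "FCD", b + res.count "FC", c + res.count "SC",
       d + res.count "P", e + res.count "F") := by
  induction res generalizing a b c d e with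
  | nil => simp
  | cons h t ih =>
    simp only [List.foldl_cons, List.count_cons]
    by_cases h1 : h = "FCD" <;> by_cases h2 : h = "FC" <;> by_cases h3 : h = "SC" <;>
      by_cases h4 : h = "P" <;> by_cases h5 : h = "F" <;>
      simp_all [ih] <;> push_cast <;> ring_nf

-- ===== VERDICT (by name: the statement is the Claim_ definition above) =====
theorem TotRes_spec : Claim_equal_TotRes := by
  intro res _
  show TotRes res = TotRes_alt res
  unfold TotRes
  rw [TotRes_fold_counts]
  simp [TotRes_alt, PySem.List.count]
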